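-- pv_equiv track=rewrite | github.com/SnehaBasugade/LeetCode-Problems | DAY=169.py | maxPathScore
-- ===== SOURCE A (Python) =====
-- def maxPathScore(grid, k):
--     m = len(grid)
--     n = len(grid[0])
--     dp = [{} for _ in range(n)]
--     dp[0][k] = 0
--     for i in range(m):
--         for j in range(n):
--             curr = grid[i][j]
--             left = dp[j - 1].copy() if j > 0 else {}
--             upper = dp[j].copy()
--             res = {}
--             for k, v in upper.items():
--                 if (k in left and left[k] < v) or (k not in left):
--                     left[k] = v
--
--             if curr != 0:
--                 for k, v in left.items():
--                     if k >= 1: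
--                         res[k - 1] = v + curr
--             else:
--                 res = left
--             dp[j] = res
--     return max(dp[n - 1].values()) if len(dp[n - 1]) != 0 else -1
-- ===== SOURCE B (Python) =====
-- def maxPathScore(grid, k):
--     # Layered DP: for each exact count c of non-zero cells spent (0..min(k, m+n-1)),
--     # run a plain 2D best-path sweep whose non-zero cells read from the previous
--     # layer; the answer is the best bottom-right value over all layers, or -1.
--     m, n = len(grid), len(grid[0])
--     limit = min(k, m + n - 1)
--     best = None
--     prev = None                      # layer c-1 table; absent for c == 0
--     for c in range(limit + 1):
--         cur = []                     # cur[i][j]: best sum to (i,j) through exactly c non-zero cells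
--         for i in range(m):
--             row = []
--             for j in range(n):
--                 v = grid[i][j]
--                 if v == 0:
--                     seed = 0 if i == 0 and j == 0 and c == 0 else None
--                     top = cur[i - 1][j] if i > 0 else None
--                     left = row[j - 1] if j > 0 else None
--                     add = 0
--                 else:
--                     seed = 0 if i == 0 and j == 0 and c == 1 else None
--                     top = prev[i - 1][j] if i > 0 and prev is not None else None
--                     left = prev[i][j - 1] if j > 0 and prev is not None else None
--                     add = v
--                 cands = [x for x in (seed, top, left) if x is not None]
--                 row.append(max(cands) + add if cands else None)
--             cur.append(row)
--         tail = cur[m - 1][n - 1]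
--         if tail is not None and (best is None or tail > best):
--             best = tail
--         prev = cur
--     return -1 if best is None else best
-- ===== Notes on version B (the rewrite author's own statement) =====
-- stated objective: alternative
-- what changed: Replaces A's single row-major sweep carrying a per-column dict keyed by remaining budget with a layered DP: an outer loop over the exact count c of non-zero cells spent (0..min(k, m+n-1)), each layer a plain 2D best-path table whose non-zero cells read from the previous layer, taking the best bottom-right value over layers; Pre_ excludes empty/ragged grids (A raises IndexError) and negative budgets k, which lie outside the natural domain of a count (A's value there is an accident of its dict seeding).
-- outside the precondition, e.g. on maxPathScore([[0]], -1): A returns 0, B returns -1; on maxPathScore([[0, 0], [1, 0]], -2): A returns 0, B returns -1; on maxPathScore([], 0): A raises IndexError, B raises IndexError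
import Mathlib
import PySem

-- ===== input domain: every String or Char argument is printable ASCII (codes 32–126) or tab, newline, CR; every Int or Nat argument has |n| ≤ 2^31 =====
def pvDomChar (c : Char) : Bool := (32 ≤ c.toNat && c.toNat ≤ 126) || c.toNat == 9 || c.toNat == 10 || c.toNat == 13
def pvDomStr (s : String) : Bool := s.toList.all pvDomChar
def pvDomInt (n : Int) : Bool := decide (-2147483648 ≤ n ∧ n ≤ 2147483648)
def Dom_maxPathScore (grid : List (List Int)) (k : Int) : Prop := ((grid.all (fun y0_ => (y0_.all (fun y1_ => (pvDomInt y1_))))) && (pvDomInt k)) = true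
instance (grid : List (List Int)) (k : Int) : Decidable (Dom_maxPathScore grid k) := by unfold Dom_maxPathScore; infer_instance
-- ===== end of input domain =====

-- B replaces A's single sweep over a per-column dict keyed by remaining budget with a
-- layered DP: one plain 2D best-path table per exact non-zero-cell count; objective: alternative.

-- ===== PORT A =====
-- A-side helper: the body of A's per-cell loop (merge `upper` into `left`, then
-- if the cell is non-zero shift every entry with key >= 1 down by one budget unit).
def pvCellA (curr : Int) (left upper : PySem.Dict Int Int) : PySem.Dict Int Int :=
  let merged := upper.items.foldl (fun left kv =>
    if (left.contains kv.1 && decide (left.getD kv.1 0 < kv.2)) || !left.contains kv.1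
    then left.insert kv.1 kv.2 else left) left
  if curr ≠ 0 then
    merged.items.foldl (fun res kv =>
      if kv.1 ≥ 1 then res.insert (kv.1 - 1) (kv.2 + curr) else res) PySem.Dict.empty
  else merged

def pvColA (grid : List (List Int)) (i : Int) (dp : List (PySem.Dict Int Int)) (j : Int) :
    List (PySem.Dict Int Int) :=
  let curr := PySem.List.pyGetD (PySem.List.pyGetD grid i []) j 0
  let left := if j > 0 then PySem.List.pyGetD dp (j - 1) PySem.Dict.empty else PySem.Dict.empty
  let upper := PySem.List.pyGetD dp j PySem.Dict.empty
  PySem.List.pySetD dp j (pvCellA curr left upper)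

def pvRowA (grid : List (List Int)) (n : Int) (dp : List (PySem.Dict Int Int)) (i : Int) :
    List (PySem.Dict Int Int) :=
  (PySem.List.pyRange 0 n 1).foldl (pvColA grid i) dp

def maxPathScore (grid : List (List Int)) (k : Int) : Int :=
  let m : Int := grid.length
  let n : Int := (PySem.List.pyGetD grid 0 []).length
  let dp : List (PySem.Dict Int Int) := List.replicate n.toNat PySem.Dict.empty
  let dp := PySem.List.pySetD dp 0 ((PySem.List.pyGetD dp 0 PySem.Dict.empty).insert k 0)
  let dp := (PySem.List.pyRange 0 m 1).foldl (pvRowA grid n) dp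
  let d := PySem.List.pyGetD dp (n - 1) PySem.Dict.empty
  if d.size ≠ 0 then (PySem.List.max? d.values (fun x => x)).getD (-1) else -1

-- ===== PORT B =====
-- B-side helper: one cell of a layer — Python's
--   cands = [x for x in (seed, top, left) if x is not None]
--   row.append(max(cands) + add if cands else None)
def pvCellB (seed top left : Option Int) (add : Int) : Option Int :=
  let cands := ([seed, top, left] : List (Option Int)).filterMap id
  if cands.isEmpty then none
  else some ((PySem.List.max? cands (fun x => x)).getD 0 + add)

def pvCellsB (grid : List (List Int)) (c : Int) (prev : Option (List (List (Option Int))))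
    (i : Int) (cur : List (List (Option Int))) (row : List (Option Int)) (j : Int) :
    List (Option Int) :=
  let v := PySem.List.pyGetD (PySem.List.pyGetD grid i []) j 0
  let cell :=
    if v = 0 then
      pvCellB (if i = 0 ∧ j = 0 ∧ c = 0 then some 0 else none)
        (if i > 0 then PySem.List.pyGetD (PySem.List.pyGetD cur (i - 1) []) j none else none)
        (if j > 0 then PySem.List.pyGetD row (j - 1) none else none) 0
    else
      pvCellB (if i = 0 ∧ j = 0 ∧ c = 1 then some 0 else none)
        (if i > 0 ∧ prev.isSome then
          PySem.List.pyGetD (PySem.List.pyGetD (prev.getD []) (i - 1) []) j none else none)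
        (if j > 0 ∧ prev.isSome then
          PySem.List.pyGetD (PySem.List.pyGetD (prev.getD []) i []) (j - 1) none else none) v
  row ++ [cell]

def pvLayerB (grid : List (List Int)) (m n c : Int)
    (prev : Option (List (List (Option Int)))) : List (List (Option Int)) :=
  (PySem.List.pyRange 0 m 1).foldl (fun cur i =>
    cur ++ [(PySem.List.pyRange 0 n 1).foldl (pvCellsB grid c prev i cur) []]) []

def pvStepB (grid : List (List Int)) (m n : Int)
    (st : Option Int × Option (List (List (Option Int)))) (c : Int) :
    Option Int × Option (List (List (Option Int))) :=
  let cur := pvLayerB grid m n c st.2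
  let tail := PySem.List.pyGetD (PySem.List.pyGetD cur (m - 1) []) (n - 1) none
  let best := match tail with
    | none => st.1
    | some t => match st.1 with
      | none => some t
      | some b => if t > b then some t else some b
  (best, some cur)

def maxPathScore_alt (grid : List (List Int)) (k : Int) : Int :=
  let m : Int := grid.length
  let n : Int := (PySem.List.pyGetD grid 0 []).length
  let limit : Int := min k (m + n - 1)
  let st := (PySem.List.pyRange 0 (limit + 1) 1).foldl (pvStepB grid m n)
    ((none : Option Int), (none : Option (List (List (Option Int)))))
  match st.1 with
  | none => -1
  | some b => b

-- ===== PRECONDITION & SPEC =====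
-- Pre_ excludes the inputs where A raises IndexError (empty grid, empty first row,
-- a later row shorter than the first), and negative budgets k < 0, which lie outside
-- the natural domain of a cell-count budget (A's value there — 0 when an all-zero
-- path exists, else -1 — is an accident of its dict seeding).
def Pre_maxPathScore (grid : List (List Int)) (k : Int) : Prop :=
  grid ≠ [] ∧ 0 < (grid.headD []).length ∧
  (∀ row ∈ grid, (grid.headD []).length ≤ row.length) ∧ 0 ≤ k
instance (grid : List (List Int)) (k : Int) : Decidable (Pre_maxPathScore grid k) := by
  unfold Pre_maxPathScore; infer_instance
def pvWitness_maxPathScore : List (List Int) × Int := ([[1, 2], [0, 3]], 2)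

def Spec_maxPathScore (grid : List (List Int)) (k : Int) (out : Int) : Prop := out = maxPathScore_alt grid k
instance (grid : List (List Int)) (k : Int) (out : Int) : Decidable (Spec_maxPathScore grid k out) := by unfold Spec_maxPathScore; infer_instance

-- ===== CLAIM (what is proved, stated in full; the proofs are below) =====
def Claim_equal_maxPathScore : Prop := ∀ (grid : List (List Int)) (k : Int), Dom_maxPathScore grid k → Pre_maxPathScore grid k → Spec_maxPathScore grid k (maxPathScore grid k)

-- ===== LEMMAS AND PROOFS =====

-- The common mathematical content: pvg grid c i j = best score of a monotone path
-- from (0,0) to (i,j) passing through exactly c non-zero cells (none = impossible).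
def pvVal (grid : List (List Int)) (i j : Nat) : Int := (grid.getD i []).getD j 0

def pvOmax : Option Int → Option Int → Option Int
  | none, b => b
  | some a, none => some a
  | some a, some b => some (max a b)

def pvg (grid : List (List Int)) (c i j : Nat) : Option Int :=
  if pvVal grid i j = 0 then
    pvOmax (pvOmax (if i = 0 ∧ j = 0 ∧ c = 0 then some 0 else none)
      (if h : 0 < i then pvg grid c (i - 1) j else none))
      (if h : 0 < j then pvg grid c i (j - 1) else none)
  else
    match c with
    | 0 => none
    | Nat.succ c' =>
      (pvOmax (pvOmax (if i = 0 ∧ j = 0 ∧ c' = 0 then some 0 else none)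
        (if h : 0 < i then pvg grid c' (i - 1) j else none))
        (if h : 0 < j then pvg grid c' i (j - 1) else none)).map (· + pvVal grid i j)
termination_by c + i + j
decreasing_by all_goals omega

def pvPred (grid : List (List Int)) (c i j : Nat) : Option Int :=
  pvOmax (pvOmax (if i = 0 ∧ j = 0 ∧ c = 0 then some 0 else none)
    (if 0 < i then pvg grid c (i - 1) j else none))
    (if 0 < j then pvg grid c i (j - 1) else none)

lemma pvg_def (grid : List (List Int)) (c i j : Nat) : pvg grid c i j =
    if pvVal grid i j = 0 then pvPred grid c i j
    else match c with
      | 0 => none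
      | Nat.succ c' => (pvPred grid c' i j).map (· + pvVal grid i j) := by
  rw [pvg.eq_def]; unfold pvPred; simp

lemma pvOmax_none_right (a : Option Int) : pvOmax a none = a := by cases a <;> rfl

lemma pvOmax_none_left (b : Option Int) : pvOmax none b = b := rfl

lemma pv_mk_items (d : PySem.Dict Int Int) : PySem.Dict.mk d.items = d := rfl

lemma pvOmax_comm (a b : Option Int) : pvOmax a b = pvOmax b a := by
  cases a <;> cases b <;> simp [pvOmax, max_comm]

lemma pvg_vanish (grid : List (List Int)) :
    ∀ N c i j, c + i + j ≤ N → i + j + 1 < c → pvg grid c i j = none := by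
  intro N
  induction N with
  | zero => intro c i j h1 h2; omega
  | succ N ih =>
    intro c i j h1 h2
    rw [pvg_def]
    split
    · unfold pvPred
      rw [if_neg (by omega)]
      have ht : (if 0 < i then pvg grid c (i - 1) j else none) = none := by
        split
        · exact ih c (i - 1) j (by omega) (by omega)
        · rfl
      have hl : (if 0 < j then pvg grid c i (j - 1) else none) = none := by
        split
        · exact ih c i (j - 1) (by omega) (by omega)
        · rfl
      rw [ht, hl]; rfl
    · cases c with
      | zero => rfl
      | succ c' =>
        have hp : pvPred grid c' i j = none := by
          unfold pvPred
          rw [if_neg (by omega)]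
          have ht : (if 0 < i then pvg grid c' (i - 1) j else none) = none := by
            split
            · exact ih c' (i - 1) j (by omega) (by omega)
            · rfl
          have hl : (if 0 < j then pvg grid c' i (j - 1) else none) = none := by
            split
            · exact ih c' i (j - 1) (by omega) (by omega)
            · rfl
          rw [ht, hl]; rfl
        show (pvPred grid c' i j).map (· + pvVal grid i j) = none
        rw [hp]; rfl

-- ---------- generic fold-with-invariant over range(0, N) ----------
lemma pv_fold_range_nat {α : Type} (P : Nat → α → Prop) (f : α → Int → α) (N : Nat)
    (hstep : ∀ (t : Nat) x, t < N → P t x → P (t + 1) (f x (t : Int))) :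
    ∀ x, P 0 x → P N ((PySem.List.pyRange 0 (N : Int) 1).foldl f x) := by
  induction N with
  | zero =>
    intro x hx
    rw [PySem.List.pyRange_one_eq_nil (by simp)]
    exact hx
  | succ N ih =>
    intro x hx
    have hcast : ((N + 1 : Nat) : Int) = (N : Int) + 1 := by push_cast; ring
    rw [hcast, PySem.List.pyRange_one_succ_right (by exact_mod_cast N.zero_le),
      List.foldl_append]
    simp only [List.foldl_cons, List.foldl_nil]
    exact hstep N _ (Nat.lt_succ_self N)
      (ih (fun t y ht hP => hstep t y (by omega) hP) x hx)

-- ---------- A side ----------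
def pvRowVal (grid : List (List Int)) (k t : Int) (j' : Nat) (key : Int) : Option Int :=
  if t < 0 then (if j' = 0 ∧ key = k then some 0 else none)
  else if 0 ≤ key ∧ key ≤ k then pvg grid (k - key).toNat t.toNat j' else none

lemma pv_merge_spec (grid : List (List Int)) (k : Int) (hk : 0 ≤ k) (i j : Nat)
    (L U : PySem.Dict Int Int)
    (hL : ∀ key, L.get? key = if 0 < j then pvRowVal grid k i (j - 1) key else none)
    (hU : ∀ key, U.get? key = pvRowVal grid k ((i : Int) - 1) j key) (key : Int) :
    pvOmax (L.get? key) (U.get? key) =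
      if 0 ≤ key ∧ key ≤ k then pvPred grid (k - key).toNat i j else none := by
  rw [hL key, hU key]
  unfold pvRowVal pvPred
  by_cases hG : 0 ≤ key ∧ key ≤ k
  · have hcc : ((k - key).toNat = 0) ↔ key = k := by omega
    by_cases hi : i = 0
    · subst hi
      by_cases hj : j = 0
      · subst hj
        by_cases hkk : key = k
        · simp only [hkk]
          simp [hk]
          rfl
        · simp [hG, hcc, hkk, pvOmax_none_right]
      · have hj' : 0 < j := Nat.pos_of_ne_zero hj
        simp [hG, hj, hj', pvOmax_none_left, pvOmax_none_right]
    · have hi' : 0 < i := Nat.pos_of_ne_zero hi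
      have ht1 : ((i : Int) - 1).toNat = i - 1 := by omega
      have ht2 : ((i : Int)).toNat = i := by omega
      have hneg : ¬((i : Int) - 1 < 0) := by omega
      by_cases hj : 0 < j
      · simp only [hG, and_self, if_true, if_pos hj, if_pos hi', hneg, if_false,
          ht1, ht2, hi, false_and,
          if_neg (by omega : ¬(i : Int) < 0), pvOmax_none_left]
        rw [pvOmax_comm]
      · simp [hG, hi, hi', hj, hneg, ht1, pvOmax_none_left, pvOmax_none_right]
  · have hUk : ¬(j = 0 ∧ key = k) := by rintro ⟨_, rfl⟩; exact hG ⟨hk, le_refl _⟩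
    by_cases hi : i = 0
    · subst hi
      simp [hG, hUk, pvOmax_none_right]
    · have hneg : ¬((i : Int) - 1 < 0) := by
        have : 0 < i := Nat.pos_of_ne_zero hi
        omega
      simp [hG, hneg, pvOmax_none_right]

lemma pv_mergeA_get? (l : List (Int × Int)) (hl : (l.map Prod.fst).Nodup) :
    ∀ (left : PySem.Dict Int Int), left.keys.Nodup → ∀ key : Int,
    (l.foldl (fun left kv =>
      if (left.contains kv.1 && decide (left.getD kv.1 0 < kv.2)) || !left.contains kv.1
      then left.insert kv.1 kv.2 else left) left).get? key
      = pvOmax (left.get? key) ((PySem.Dict.mk l).get? key) := by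
  induction l with
  | nil =>
    intro left _ key
    simp only [List.foldl_nil]
    have : (PySem.Dict.mk ([] : List (Int × Int))).get? key = none := rfl
    rw [this]
    cases left.get? key <;> rfl
  | cons kv rest ih =>
    intro left hL key
    obtain ⟨k₀, v₀⟩ := kv
    simp only [List.map_cons, List.nodup_cons] at hl
    have hrest := hl.2
    have hk₀ : k₀ ∉ rest.map Prod.fst := hl.1
    simp only [List.foldl_cons]
    set left' := (if (left.contains k₀ && decide (left.getD k₀ 0 < v₀)) || !left.contains k₀
      then left.insert k₀ v₀ else left) with hleft'
    have hL' : left'.keys.Nodup := by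
      rw [hleft']; split
      · exact PySem.Dict.nodup_keys_insert _ _ _ hL
      · exact hL
    rw [ih hrest left' hL' key]
    rw [PySem.Dict.get?_mk_cons]
    by_cases hk : key = k₀
    · subst hk
      have hnone : (PySem.Dict.mk rest).get? key = none := by
        rw [PySem.Dict.get?_eq_none_iff_not_mem_keys]
        simpa [PySem.Dict.keys] using hk₀
      rw [hnone, pvOmax_none_right, if_pos (by simp)]
      rw [hleft']
      cases hget : left.get? key with
      | none =>
        have hcont : left.contains key = false := by
          rw [PySem.Dict.contains_eq_isSome_get?, hget]; rfl
        simp only [hcont]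
        simp [PySem.Dict.get?_insert_self, pvOmax]
      | some w =>
        have hcont : left.contains key = true := by
          rw [PySem.Dict.contains_eq_isSome_get?, hget]; rfl
        have hgetD : left.getD key 0 = w := by
          rw [PySem.Dict.getD_eq_get?_getD, hget]; rfl
        simp only [hcont, hgetD, Bool.not_true, Bool.or_false, Bool.true_and]
        by_cases hlt : w < v₀
        · simp [hlt, PySem.Dict.get?_insert_self, pvOmax, max_eq_right (le_of_lt hlt)]
        · simp [hlt, hget, pvOmax, max_eq_left (not_lt.mp hlt)]
    · have : left'.get? key = left.get? key := by
        rw [hleft']; split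
        · exact PySem.Dict.get?_insert_of_ne _ _ hk
        · rfl
      rw [this, if_neg (by simpa using fun h => hk h.symm)]

lemma pv_mergeA_nodup (l : List (Int × Int)) :
    ∀ (left : PySem.Dict Int Int), left.keys.Nodup →
    (l.foldl (fun left kv =>
      if (left.contains kv.1 && decide (left.getD kv.1 0 < kv.2)) || !left.contains kv.1
      then left.insert kv.1 kv.2 else left) left).keys.Nodup := by
  induction l with
  | nil => intro left hL; exact hL
  | cons kv rest ih =>
    intro left hL
    simp only [List.foldl_cons]
    apply ih
    split
    · exact PySem.Dict.nodup_keys_insert _ _ _ hL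
    · exact hL

lemma pv_shiftA_nodup (curr : Int) (l : List (Int × Int)) :
    ∀ (acc : PySem.Dict Int Int), acc.keys.Nodup →
    (l.foldl (fun res kv =>
      if kv.1 ≥ 1 then res.insert (kv.1 - 1) (kv.2 + curr) else res) acc).keys.Nodup := by
  induction l with
  | nil => intro acc h; exact h
  | cons kv rest ih =>
    intro acc h
    simp only [List.foldl_cons]
    apply ih
    split
    · exact PySem.Dict.nodup_keys_insert _ _ _ h
    · exact h

lemma pv_shiftA_get? (curr : Int) (l : List (Int × Int)) (hl : (l.map Prod.fst).Nodup) :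
    ∀ (acc : PySem.Dict Int Int), acc.keys.Nodup → ∀ key : Int,
    (l.foldl (fun res kv =>
      if kv.1 ≥ 1 then res.insert (kv.1 - 1) (kv.2 + curr) else res) acc).get? key
      = if 0 ≤ key then
          (match (PySem.Dict.mk l).get? (key + 1) with
           | some v => some (v + curr)
           | none => acc.get? key)
        else acc.get? key := by
  induction l with
  | nil =>
    intro acc _ key
    simp only [List.foldl_nil]
    have : (PySem.Dict.mk ([] : List (Int × Int))).get? (key + 1) = none := rfl
    rw [this]
    split <;> rfl
  | cons kv rest ih =>
    intro acc hacc key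
    obtain ⟨k₀, v₀⟩ := kv
    simp only [List.map_cons, List.nodup_cons] at hl
    have hk₀ : k₀ ∉ rest.map Prod.fst := hl.1
    simp only [List.foldl_cons]
    set acc' := (if k₀ ≥ 1 then acc.insert (k₀ - 1) (v₀ + curr) else acc) with hacc'
    have hacc'n : acc'.keys.Nodup := by
      rw [hacc']; split
      · exact PySem.Dict.nodup_keys_insert _ _ _ hacc
      · exact hacc
    rw [ih hl.2 acc' hacc'n key]
    rw [PySem.Dict.get?_mk_cons]
    by_cases hk : k₀ = key + 1
    · subst hk
      have hnone : (PySem.Dict.mk rest).get? (key + 1) = none := by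
        rw [PySem.Dict.get?_eq_none_iff_not_mem_keys]
        simpa [PySem.Dict.keys] using hk₀
      by_cases h0 : 0 ≤ key
      · have hacck : acc'.get? key = some (v₀ + curr) := by
          rw [hacc', if_pos (by omega)]
          have he : key + 1 - 1 = key := by ring
          rw [he]
          exact PySem.Dict.get?_insert_self _ _ _
        rw [if_pos h0, hnone]
        simp only [hacck]
        simp only [beq_self_eq_true, if_true]
        rw [if_pos h0]
      · have hacck : acc' = acc := by rw [hacc', if_neg (by omega)]
        rw [if_neg h0, hacck, if_neg h0]
    · have hne : (k₀ == key + 1) = false := by simpa using hk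
      rw [hne]
      simp only [Bool.false_eq_true, if_false]
      have hsame : acc'.get? key = acc.get? key := by
        rw [hacc']; split
        · exact PySem.Dict.get?_insert_of_ne _ _ (by omega)
        · rfl
      rw [hsame]

lemma pv_cellA_spec (grid : List (List Int)) (k : Int) (hk : 0 ≤ k) (i j : Nat)
    (L U : PySem.Dict Int Int) (hLn : L.keys.Nodup) (hUn : U.keys.Nodup)
    (hL : ∀ key, L.get? key = if 0 < j then pvRowVal grid k i (j - 1) key else none)
    (hU : ∀ key, U.get? key = pvRowVal grid k ((i : Int) - 1) j key) :
    (pvCellA (pvVal grid i j) L U).keys.Nodup ∧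
    ∀ key, (pvCellA (pvVal grid i j) L U).get? key = pvRowVal grid k i j key := by
  have hmg : ∀ key, (U.items.foldl (fun left kv =>
      if (left.contains kv.1 && decide (left.getD kv.1 0 < kv.2)) || !left.contains kv.1
      then left.insert kv.1 kv.2 else left) L).get? key
      = if 0 ≤ key ∧ key ≤ k then pvPred grid (k - key).toNat i j else none := by
    intro key
    rw [pv_mergeA_get? U.items hUn L hLn key, pv_mk_items]
    exact pv_merge_spec grid k hk i j L U hL hU key
  have hmn := pv_mergeA_nodup U.items L hLn
  simp only [pvCellA]
  by_cases hv : pvVal grid i j = 0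
  · rw [if_neg (fun h => h hv)]
    refine ⟨hmn, fun key => ?_⟩
    rw [hmg key]
    unfold pvRowVal
    rw [if_neg (by omega : ¬(i : Int) < 0)]
    have ht : ((i : Int)).toNat = i := by omega
    rw [ht]
    by_cases hG : 0 ≤ key ∧ key ≤ k
    · rw [if_pos hG, if_pos hG, pvg_def, if_pos hv]
    · rw [if_neg hG, if_neg hG]
  · rw [if_pos hv]
    refine ⟨pv_shiftA_nodup _ _ PySem.Dict.empty (by simp [PySem.Dict.keys_empty]),
      fun key => ?_⟩
    rw [pv_shiftA_get? (pvVal grid i j) _ hmn PySem.Dict.empty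
      (by simp [PySem.Dict.keys_empty]) key, pv_mk_items, hmg (key + 1),
      PySem.Dict.get?_empty]
    unfold pvRowVal
    rw [if_neg (by omega : ¬(i : Int) < 0)]
    have ht : ((i : Int)).toNat = i := by omega
    rw [ht]
    by_cases h0 : 0 ≤ key
    · rw [if_pos h0]
      by_cases hkk : key ≤ k
      · rw [if_pos (⟨h0, hkk⟩ : 0 ≤ key ∧ key ≤ k)]
        by_cases heq : key = k
        · rw [if_neg (by omega : ¬(0 ≤ key + 1 ∧ key + 1 ≤ k))]
          have hc0 : (k - key).toNat = 0 := by omega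
          rw [hc0, pvg_def, if_neg hv]
        · rw [if_pos (by omega : 0 ≤ key + 1 ∧ key + 1 ≤ k)]
          have hsucc : (k - key).toNat = (k - (key + 1)).toNat + 1 := by omega
          rw [hsucc, pvg_def, if_neg hv]
          have hred : (match (k - (key + 1)).toNat + 1 with
              | 0 => (none : Option Int)
              | Nat.succ c' => (pvPred grid c' i j).map (· + pvVal grid i j))
              = (pvPred grid (k - (key + 1)).toNat i j).map (· + pvVal grid i j) := rfl
          rw [hred]
          cases pvPred grid (k - (key + 1)).toNat i j <;> rfl
      · rw [if_neg (by omega : ¬(0 ≤ key + 1 ∧ key + 1 ≤ k)),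
          if_neg (by omega : ¬(0 ≤ key ∧ key ≤ k))]
    · rw [if_neg h0, if_neg (by omega : ¬(0 ≤ key ∧ key ≤ k))]

def pvInvA (grid : List (List Int)) (k : Int) (n : Nat) (r : Nat → Int)
    (dp : List (PySem.Dict Int Int)) : Prop :=
  dp.length = n ∧ ∀ j' : Nat, j' < n → (dp.getD j' PySem.Dict.empty).keys.Nodup ∧
    ∀ key, (dp.getD j' PySem.Dict.empty).get? key = pvRowVal grid k (r j') j' key

-- ---------- B side ----------
def pvTab (grid : List (List Int)) (m n c : Nat) (T : List (List (Option Int))) : Prop :=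
  T.length = m ∧ ∀ i : Nat, i < m → (T.getD i []).length = n ∧
    ∀ j : Nat, j < n → (T.getD i []).getD j none = pvg grid c i j

def pvBest (grid : List (List Int)) (m n : Nat) : Nat → Option Int
  | 0 => none
  | c + 1 => match pvg grid c (m - 1) (n - 1), pvBest grid m n c with
      | none, b => b
      | some t, none => some t
      | some t, some b => if t > b then some t else some b

lemma pv_cellB_spec (s t l : Option Int) (add : Int) :
    pvCellB s t l add = (pvOmax (pvOmax s t) l).map (· + add) := by
  rcases s with _ | a <;> rcases t with _ | b <;> rcases l with _ | c <;>
    simp [pvCellB, pvOmax, PySem.List.max?_id_cons]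

-- ---------- final comparison ----------
lemma pvBest_none_iff (grid : List (List Int)) (m n : Nat) (C : Nat) :
    pvBest grid m n C = none ↔ ∀ c < C, pvg grid c (m - 1) (n - 1) = none := by
  induction C with
  | zero => simp [pvBest]
  | succ C ih =>
    rw [pvBest]
    rcases hF : pvg grid C (m - 1) (n - 1) with _ | t <;>
      rcases hB : pvBest grid m n C with _ | b
    · show (none : Option Int) = none ↔ _
      constructor
      · intro _ c hc
        rcases (by omega : c < C ∨ c = C) with h' | rfl
        · exact (ih.mp hB) c h'
        · exact hF
      · intro _; rfl
    · show (some b : Option Int) = none ↔ _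
      constructor
      · intro h; cases h
      · intro h
        exact absurd (ih.mpr fun c hc => h c (by omega)) (by rw [hB]; simp)
    · show (some t : Option Int) = none ↔ _
      constructor
      · intro h; cases h
      · intro h; exact absurd (h C (Nat.lt_succ_self C)) (by rw [hF]; simp)
    · show (if t > b then some t else some b) = none ↔ _
      constructor
      · intro h
        by_cases hgt : t > b
        · rw [if_pos hgt] at h; cases h
        · rw [if_neg hgt] at h; cases h
      · intro h; exact absurd (h C (Nat.lt_succ_self C)) (by rw [hF]; simp)

lemma pvBest_some (grid : List (List Int)) (m n : Nat) (C : Nat) (x : Int)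
    (h : pvBest grid m n C = some x) :
    (∃ c < C, pvg grid c (m - 1) (n - 1) = some x) ∧
    (∀ c < C, ∀ y, pvg grid c (m - 1) (n - 1) = some y → y ≤ x) := by
  induction C generalizing x with
  | zero => simp [pvBest] at h
  | succ C ih =>
    rw [pvBest] at h
    rcases hF : pvg grid C (m - 1) (n - 1) with _ | t <;> rw [hF] at h
    · change pvBest grid m n C = some x at h
      obtain ⟨⟨c, hc, hcx⟩, hmax⟩ := ih x h
      refine ⟨⟨c, by omega, hcx⟩, fun c' hc' y hy => ?_⟩
      rcases (by omega : c' < C ∨ c' = C) with h' | rfl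
      · exact hmax c' h' y hy
      · rw [hF] at hy; cases hy
    · rcases hB : pvBest grid m n C with _ | b <;> rw [hB] at h
      · change (some t : Option Int) = some x at h
        injection h with h; subst h
        refine ⟨⟨C, Nat.lt_succ_self C, hF⟩, fun c' hc' y hy => ?_⟩
        rcases (by omega : c' < C ∨ c' = C) with h' | rfl
        · rw [(pvBest_none_iff grid m n C).mp hB c' h'] at hy; cases hy
        · rw [hF] at hy; injection hy with hy; omega
      · change (if t > b then some t else some b) = some x at h
        obtain ⟨⟨c, hc, hcx⟩, hmax⟩ := ih b hB
        by_cases hgt : t > b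
        · rw [if_pos hgt] at h; injection h with h; subst h
          refine ⟨⟨C, Nat.lt_succ_self C, hF⟩, fun c' hc' y hy => ?_⟩
          rcases (by omega : c' < C ∨ c' = C) with h' | rfl
          · have := hmax c' h' y hy; omega
          · rw [hF] at hy; injection hy with hy; omega
        · rw [if_neg hgt] at h; injection h with h; subst h
          refine ⟨⟨c, by omega, hcx⟩, fun c' hc' y hy => ?_⟩
          rcases (by omega : c' < C ∨ c' = C) with h' | rfl
          · exact hmax c' h' y hy
          · rw [hF] at hy; injection hy with hy; omega

lemma pvInvA_congr (grid : List (List Int)) (k : Int) (n : Nat) (r r' : Nat → Int)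
    (h : ∀ j' : Nat, j' < n → r j' = r' j') (dp : List (PySem.Dict Int Int))
    (hdp : pvInvA grid k n r dp) : pvInvA grid k n r' dp := by
  obtain ⟨h1, h2⟩ := hdp
  exact ⟨h1, fun j' hj' => by rw [← h j' hj']; exact h2 j' hj'⟩

lemma pv_colA_spec (grid : List (List Int)) (k : Int) (hk : 0 ≤ k) (N i t : Nat)
    (ht : t < N) (dp : List (PySem.Dict Int Int))
    (hdp : pvInvA grid k N (fun j' => if j' < t then (i : Int) else (i : Int) - 1) dp) :
    pvInvA grid k N (fun j' => if j' < t + 1 then (i : Int) else (i : Int) - 1)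
      (pvColA grid (i : Int) dp (t : Int)) := by
  obtain ⟨hlen, hspec⟩ := hdp
  simp only [pvColA]
  have hcurr : PySem.List.pyGetD (PySem.List.pyGetD grid (i : Int) []) (t : Int) 0
      = pvVal grid i t := by simp [pvVal]
  have hUspec := hspec t ht
  simp only [lt_self_iff_false, if_false] at hUspec
  have hU1 : PySem.List.pyGetD dp (t : Int) PySem.Dict.empty = dp.getD t PySem.Dict.empty := by
    simp
  set L := (if (t : Int) > 0 then PySem.List.pyGetD dp ((t : Int) - 1) PySem.Dict.empty
    else PySem.Dict.empty) with hLdef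
  have hLn : L.keys.Nodup := by
    rw [hLdef]
    split
    · rename_i hpos
      have ht' : 0 < t := by exact_mod_cast hpos
      rw [(by omega : (t : Int) - 1 = ((t - 1 : Nat) : Int))]
      simp only [PySem.List.pyGetD_natCast]
      exact (hspec (t - 1) (by omega)).1
    · simp [PySem.Dict.keys_empty]
  have hL : ∀ key, L.get? key = if 0 < t then pvRowVal grid k (i : Int) (t - 1) key else none := by
    intro key
    rw [hLdef]
    by_cases ht' : 0 < t
    · rw [if_pos (by exact_mod_cast ht'), if_pos ht',
        (by omega : (t : Int) - 1 = ((t - 1 : Nat) : Int))]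
      simp only [PySem.List.pyGetD_natCast]
      have := (hspec (t - 1) (by omega)).2 key
      simp only [if_pos (show t - 1 < t by omega)] at this
      exact this
    · rw [if_neg (by exact_mod_cast ht'), if_neg ht']
      exact PySem.Dict.get?_empty _
  rw [hcurr, hU1]
  have hcell := pv_cellA_spec grid k hk i t L (dp.getD t PySem.Dict.empty)
    hLn hUspec.1 hL hUspec.2
  have hset : PySem.List.pySetD dp (t : Int) (pvCellA (pvVal grid i t) L (dp.getD t PySem.Dict.empty))
      = dp.set t (pvCellA (pvVal grid i t) L (dp.getD t PySem.Dict.empty)) := by simp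
  rw [hset]
  refine ⟨by simp [hlen], fun j' hj' => ?_⟩
  by_cases hjt : j' = t
  · subst hjt
    have hget : (dp.set j' (pvCellA (pvVal grid i j') L (dp.getD j' PySem.Dict.empty))).getD j'
        PySem.Dict.empty = pvCellA (pvVal grid i j') L (dp.getD j' PySem.Dict.empty) := by
      simp [List.getD_eq_getElem?_getD, hlen ▸ hj']
    rw [hget]
    simp only [if_pos (show j' < j' + 1 by omega)]
    exact hcell
  · have hget : (dp.set t (pvCellA (pvVal grid i t) L (dp.getD t PySem.Dict.empty))).getD j'
        PySem.Dict.empty = dp.getD j' PySem.Dict.empty := by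
      simp [List.getD_eq_getElem?_getD, Ne.symm hjt]
    rw [hget]
    have := hspec j' hj'
    by_cases hlt : j' < t
    · simp only [if_pos hlt] at this
      simp only [if_pos (show j' < t + 1 by omega)]
      exact this
    · simp only [if_neg hlt] at this
      simp only [if_neg (show ¬ j' < t + 1 by omega)]
      exact this

lemma pv_rowA_spec (grid : List (List Int)) (k : Int) (hk : 0 ≤ k) (N i : Nat)
    (dp : List (PySem.Dict Int Int))
    (hdp : pvInvA grid k N (fun _ => (i : Int) - 1) dp) :
    pvInvA grid k N (fun _ => (i : Int)) (pvRowA grid (N : Int) dp (i : Int)) := by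
  unfold pvRowA
  have h := pv_fold_range_nat
    (fun t dp => pvInvA grid k N (fun j' => if j' < t then (i : Int) else (i : Int) - 1) dp)
    (pvColA grid (i : Int)) N
    (fun t dp' ht hP => pv_colA_spec grid k hk N i t ht dp' hP) dp
    (pvInvA_congr grid k N _ _ (fun j' _ => by simp) dp hdp)
  exact pvInvA_congr grid k N _ _ (fun j' hj' => by simp [hj']) _ h

def pvRes (grid : List (List Int)) (k : Int) (M N : Nat) : Int :=
  match pvBest grid M N ((min k ((M : Int) + (N : Int) - 1)).toNat + 1) with
  | none => -1
  | some b => b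

lemma pv_finalA (grid : List (List Int)) (k : Int) (hk : 0 ≤ k) (M N : Nat)
    (hM : 0 < M) (hN : 0 < N) (d : PySem.Dict Int Int) (hdn : d.keys.Nodup)
    (hd : ∀ key, d.get? key = pvRowVal grid k ((M : Int) - 1) (N - 1) key) :
    (if d.size ≠ 0 then (PySem.List.max? d.values (fun x => x)).getD (-1) else -1)
      = pvRes grid k M N := by
  set LN := (min k ((M : Int) + (N : Int) - 1)).toNat with hLN
  have hvan : ∀ c : Nat, M + N - 1 < c → pvg grid c (M - 1) (N - 1) = none := fun c hc =>
    pvg_vanish grid (c + (M - 1) + (N - 1)) c (M - 1) (N - 1) le_rfl (by omega)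
  have hval : ∀ v : Int, v ∈ d.values ↔
      ∃ c : Nat, c < LN + 1 ∧ pvg grid c (M - 1) (N - 1) = some v := by
    intro v
    constructor
    · intro hv
      have hv' : ∃ q ∈ d.items, q.2 = v := by
        simpa [PySem.Dict.values, List.mem_map] using hv
      obtain ⟨q, hq, hqv⟩ := hv'
      have hkey : d.get? q.1 = some v := by
        rw [PySem.Dict.get?_eq_some_iff_mem_items d q.1 v hdn]
        obtain ⟨q1, q2⟩ := q
        cases hqv
        exact hq
      rw [hd] at hkey
      unfold pvRowVal at hkey
      rw [if_neg (by omega : ¬(M : Int) - 1 < 0)] at hkey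
      by_cases hG : 0 ≤ q.1 ∧ q.1 ≤ k
      · rw [if_pos hG] at hkey
        have htM : ((M : Int) - 1).toNat = M - 1 := by omega
        rw [htM] at hkey
        refine ⟨(k - q.1).toNat, ?_, hkey⟩
        by_contra hbig
        rw [hvan _ (by omega)] at hkey
        cases hkey
      · rw [if_neg hG] at hkey; cases hkey
    · rintro ⟨c, hc, hcv⟩
      have hkey : d.get? (k - c) = some v := by
        rw [hd]
        unfold pvRowVal
        rw [if_neg (by omega : ¬(M : Int) - 1 < 0),
          if_pos (by omega : 0 ≤ k - (c : Int) ∧ k - (c : Int) ≤ k)]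
        have h1 : (k - (k - (c : Int))).toNat = c := by omega
        have htM : ((M : Int) - 1).toNat = M - 1 := by omega
        rw [h1, htM]
        exact hcv
      rw [PySem.Dict.get?_eq_some_iff_mem_items d _ v hdn] at hkey
      simp only [PySem.Dict.values, List.mem_map]
      exact ⟨(k - c, v), hkey, rfl⟩
  rcases hb : pvBest grid M N (LN + 1) with _ | x
  · have hemp : d.values = [] := by
      rw [List.eq_nil_iff_forall_not_mem]
      intro v hv
      obtain ⟨c, hc, hcv⟩ := (hval v).mp hv
      rw [(pvBest_none_iff grid M N (LN + 1)).mp hb c hc] at hcv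
      cases hcv
    have hsz : d.size = 0 := by
      show d.items.length = 0
      have := congrArg List.length hemp
      simpa [PySem.Dict.values] using this
    rw [if_neg (by simp [hsz])]
    unfold pvRes
    rw [← hLN, hb]
  · obtain ⟨⟨c0, hc0, hcx⟩, hmaxx⟩ := pvBest_some grid M N (LN + 1) x hb
    have hxmem : x ∈ d.values := (hval x).mpr ⟨c0, hc0, hcx⟩
    have hvne : d.values ≠ [] := List.ne_nil_of_mem hxmem
    have hsz : d.size ≠ 0 := by
      intro h0
      apply hvne
      have : d.items = [] := List.eq_nil_of_length_eq_zero h0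
      simp [PySem.Dict.values, this]
    rw [if_pos hsz]
    rcases hm : PySem.List.max? d.values (fun x => x) with _ | M0
    · exact absurd ((PySem.List.max?_eq_none_iff _ _).mp hm) hvne
    · have hM0mem := PySem.List.max?_mem hm
      have hM0max := PySem.List.max?_isMax hm
      obtain ⟨c1, hc1, hcM0⟩ := (hval M0).mp hM0mem
      have h1 : M0 ≤ x := hmaxx c1 hc1 M0 hcM0
      have h2 : x ≤ M0 := hM0max x hxmem
      unfold pvRes
      rw [← hLN, hb]
      simp
      omega

lemma pv_A_eq (grid : List (List Int)) (k : Int) (hne : grid ≠ [])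
    (hn0 : 0 < (grid.headD []).length) (hk : 0 ≤ k) :
    maxPathScore grid k = pvRes grid k grid.length (grid.headD []).length := by
  have hhead : PySem.List.pyGetD grid 0 ([] : List Int) = grid.headD [] := by
    cases grid with
    | nil => cases hne rfl
    | cons g tl => simp [PySem.List.pyGetD_zero]
  have hM0 : 0 < grid.length := by
    cases grid with
    | nil => cases hne rfl
    | cons g tl => simp
  simp only [maxPathScore, hhead, Int.toNat_natCast]
  set M := grid.length with hMdef
  set N := (grid.headD []).length with hNdef
  have hdp0g : PySem.List.pyGetD (List.replicate N (PySem.Dict.empty : PySem.Dict Int Int)) 0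
      PySem.Dict.empty = PySem.Dict.empty := by
    rw [PySem.List.pyGetD_zero]
    cases hN' : N with
    | zero => rfl
    | succ n' => simp [List.replicate_succ]
  have hdp0s : PySem.List.pySetD (List.replicate N PySem.Dict.empty) 0
      (PySem.Dict.empty.insert k (0 : Int))
      = (List.replicate N PySem.Dict.empty).set 0 (PySem.Dict.empty.insert k (0 : Int)) := by
    rw [PySem.List.pySetD_of_nonneg _ _ (by norm_num : (0:Int) ≤ 0)]
    rfl
  rw [hdp0g, hdp0s]
  have hinit : pvInvA grid k N (fun _ => ((0 : Nat) : Int) - 1)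
      ((List.replicate N PySem.Dict.empty).set 0 (PySem.Dict.empty.insert k (0 : Int))) := by
    refine ⟨by simp, fun j' hj' => ?_⟩
    by_cases hj0 : j' = 0
    · subst hj0
      have hget : ((List.replicate N PySem.Dict.empty).set 0
          (PySem.Dict.empty.insert k (0 : Int))).getD 0 PySem.Dict.empty
          = PySem.Dict.empty.insert k (0 : Int) := by
        simp [List.getD_eq_getElem?_getD, hn0]
      rw [hget]
      refine ⟨PySem.Dict.nodup_keys_insert _ _ _ (by simp [PySem.Dict.keys_empty]),
        fun key => ?_⟩
      unfold pvRowVal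
      rw [if_pos (by norm_num : ((0 : Nat) : Int) - 1 < 0)]
      by_cases hkk : key = k
      · subst hkk
        simp [PySem.Dict.get?_insert_self]
      · rw [PySem.Dict.get?_insert_of_ne _ _ hkk, PySem.Dict.get?_empty,
          if_neg (by rintro ⟨-, h⟩; exact hkk h)]
    · have hget : ((List.replicate N PySem.Dict.empty).set 0
          (PySem.Dict.empty.insert k (0 : Int))).getD j' PySem.Dict.empty = PySem.Dict.empty := by
        simp [List.getD_eq_getElem?_getD, Ne.symm hj0, hj']
      rw [hget]
      refine ⟨by simp [PySem.Dict.keys_empty], fun key => ?_⟩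
      rw [PySem.Dict.get?_empty]
      unfold pvRowVal
      rw [if_pos (by norm_num : ((0 : Nat) : Int) - 1 < 0),
        if_neg (by rintro ⟨h, -⟩; exact hj0 h)]
  have hfold := pv_fold_range_nat (fun tN dp => pvInvA grid k N (fun _ => (tN : Int) - 1) dp)
    (pvRowA grid (N : Int)) M
    (fun tN dp htN hP => pvInvA_congr grid k N _ _ (fun j' _ => by push_cast; ring) _
      (pv_rowA_spec grid k hk N tN dp hP)) _ hinit
  obtain ⟨hlen, hspec⟩ := hfold
  have hd := hspec (N - 1) (by omega)
  have hgd : PySem.List.pyGetD ((PySem.List.pyRange 0 (M : Int) 1).foldl (pvRowA grid (N : Int))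
      ((List.replicate N PySem.Dict.empty).set 0 (PySem.Dict.empty.insert k (0 : Int))))
      ((N : Int) - 1) PySem.Dict.empty
      = ((PySem.List.pyRange 0 (M : Int) 1).foldl (pvRowA grid (N : Int))
      ((List.replicate N (PySem.Dict.empty : PySem.Dict Int Int)).set 0
        (PySem.Dict.empty.insert k (0 : Int)))).getD (N - 1) PySem.Dict.empty := by
    rw [(by omega : (N : Int) - 1 = ((N - 1 : Nat) : Int))]
    simp
  rw [hgd]
  exact pv_finalA grid k hk M N hM0 hn0 _ hd.1 hd.2

lemma pv_getD_concat {α : Type} (l : List α) (x d : α) (n : Nat) (h : n = l.length) :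
    (l ++ [x]).getD n d = x := by
  subst h
  simp [List.getD_eq_getElem?_getD]

lemma pv_cellsB_spec (grid : List (List Int)) (M N cN i t : Nat)
    (prev : Option (List (List (Option Int))))
    (h0 : cN = 0 → prev = none)
    (hS : ∀ c', cN = c' + 1 → ∃ T, prev = some T ∧ pvTab grid M N c' T)
    (cur : List (List (Option Int))) (row : List (Option Int))
    (_hcurlen : cur.length = i)
    (hcur : ∀ i' : Nat, i' < i → (cur.getD i' []).length = N ∧
      ∀ j : Nat, j < N → (cur.getD i' []).getD j none = pvg grid cN i' j)
    (hrow : ∀ j : Nat, j < t → row.getD j none = pvg grid cN i j)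
    (hi : i < M) (ht : t < N) :
    pvCellsB grid (cN : Int) prev (i : Int) cur row (t : Int) = row ++ [pvg grid cN i t] := by
  simp only [pvCellsB]
  refine congrArg (fun x => row ++ [x]) ?_
  have hv : PySem.List.pyGetD (PySem.List.pyGetD grid (i : Int) []) (t : Int) 0
      = pvVal grid i t := by simp [pvVal]
  rw [hv]
  have h0' : ((i : Int) = 0) ↔ i = 0 := by omega
  have ht0 : ((t : Int) = 0) ↔ t = 0 := by omega
  by_cases hz : pvVal grid i t = 0
  · rw [if_pos hz]
    have hc0 : ((cN : Int) = 0) ↔ cN = 0 := by omega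
    have htop : (if (i : Int) > 0 then
        PySem.List.pyGetD (PySem.List.pyGetD cur ((i : Int) - 1) []) (t : Int) none else none)
        = (if 0 < i then pvg grid cN (i - 1) t else none) := by
      by_cases hii : 0 < i
      · rw [if_pos (by exact_mod_cast hii), if_pos hii,
          (by omega : (i : Int) - 1 = ((i - 1 : Nat) : Int))]
        simp only [PySem.List.pyGetD_natCast]
        exact (hcur (i - 1) (by omega)).2 t ht
      · rw [if_neg (by exact_mod_cast hii), if_neg hii]
    have hleft : (if (t : Int) > 0 then PySem.List.pyGetD row ((t : Int) - 1) none else none)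
        = (if 0 < t then pvg grid cN i (t - 1) else none) := by
      by_cases htt : 0 < t
      · rw [if_pos (by exact_mod_cast htt), if_pos htt,
          (by omega : (t : Int) - 1 = ((t - 1 : Nat) : Int))]
        simp only [PySem.List.pyGetD_natCast]
        exact hrow (t - 1) (by omega)
      · rw [if_neg (by exact_mod_cast htt), if_neg htt]
    simp only [h0', ht0, hc0, htop, hleft]
    rw [pv_cellB_spec]
    have hmap : ∀ o : Option Int, o.map (· + 0) = o := by intro o; cases o <;> simp
    rw [hmap]
    conv_rhs => rw [pvg_def, if_pos hz]
    unfold pvPred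
    rfl
  · rw [if_neg hz]
    cases cN with
    | zero =>
      rw [h0 rfl]
      rw [pv_cellB_spec]
      conv_rhs => rw [pvg_def, if_neg hz]
      simp
      rfl
    | succ c' =>
      obtain ⟨T, hT, hTab⟩ := hS c' rfl
      rw [hT]
      have hc1 : (((c' + 1 : Nat) : Int) = 1) ↔ c' = 0 := by omega
      simp only [Option.isSome_some, and_true, Option.getD_some, h0', ht0, hc1]
      have htop : (if (i : Int) > 0 then
          PySem.List.pyGetD (PySem.List.pyGetD T ((i : Int) - 1) []) (t : Int) none else none)
          = (if 0 < i then pvg grid c' (i - 1) t else none) := by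
        by_cases hii : 0 < i
        · rw [if_pos (by exact_mod_cast hii), if_pos hii,
            (by omega : (i : Int) - 1 = ((i - 1 : Nat) : Int))]
          simp only [PySem.List.pyGetD_natCast]
          exact (hTab.2 (i - 1) (by omega)).2 t ht
        · rw [if_neg (by exact_mod_cast hii), if_neg hii]
      have hleft : (if (t : Int) > 0 then
          PySem.List.pyGetD (PySem.List.pyGetD T (i : Int) []) ((t : Int) - 1) none else none)
          = (if 0 < t then pvg grid c' i (t - 1) else none) := by
        by_cases htt : 0 < t
        · rw [if_pos (by exact_mod_cast htt), if_pos htt,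
            (by omega : (t : Int) - 1 = ((t - 1 : Nat) : Int))]
          simp only [PySem.List.pyGetD_natCast]
          exact (hTab.2 i hi).2 (t - 1) (by omega)
        · rw [if_neg (by exact_mod_cast htt), if_neg htt]
      simp only [htop, hleft]
      rw [pv_cellB_spec]
      conv_rhs => rw [pvg_def, if_neg hz]
      have hred : (match c' + 1 with
          | 0 => (none : Option Int)
          | Nat.succ c'' => (pvPred grid c'' i t).map (· + pvVal grid i t))
          = (pvPred grid c' i t).map (· + pvVal grid i t) := rfl
      rw [hred]
      unfold pvPred
      rfl

lemma pv_layerB_spec (grid : List (List Int)) (M N cN : Nat)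
    (prev : Option (List (List (Option Int))))
    (h0 : cN = 0 → prev = none)
    (hS : ∀ c', cN = c' + 1 → ∃ T, prev = some T ∧ pvTab grid M N c' T) :
    pvTab grid M N cN (pvLayerB grid (M : Int) (N : Int) (cN : Int) prev) := by
  have key := pv_fold_range_nat
    (fun r cur => cur.length = r ∧ ∀ i' : Nat, i' < r → (cur.getD i' []).length = N ∧
      ∀ j : Nat, j < N → (cur.getD i' []).getD j none = pvg grid cN i' j)
    (fun cur i =>
      cur ++ [(PySem.List.pyRange 0 (N : Int) 1).foldl (pvCellsB grid (cN : Int) prev i cur) []])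
    M ?step [] ⟨rfl, fun i' h => absurd h (by omega)⟩
  · unfold pvLayerB pvTab
    exact key
  case step =>
    intro r cur hr hP
    have hrowf := pv_fold_range_nat
      (fun sN row => row.length = sN ∧ ∀ j : Nat, j < sN → row.getD j none = pvg grid cN r j)
      (pvCellsB grid (cN : Int) prev (r : Int) cur) N ?cellstep []
      ⟨rfl, fun j hj => absurd hj (by omega)⟩
    · refine ⟨by simp [hP.1], fun i' hi' => ?_⟩
      by_cases hir : i' = r
      · subst hir
        rw [pv_getD_concat _ _ _ _ (hP.1).symm]
        exact ⟨hrowf.1, hrowf.2⟩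
      · have hlt : i' < cur.length := by omega
        have hget : ((cur ++ [(PySem.List.pyRange 0 (N : Int) 1).foldl
            (pvCellsB grid (cN : Int) prev (r : Int) cur) []]).getD i' [])
            = cur.getD i' [] := List.getD_append _ _ _ _ hlt
        rw [hget]
        exact hP.2 i' (by omega)
    case cellstep =>
      intro sN row hs hrowP
      rw [pv_cellsB_spec grid M N cN r sN prev h0 hS cur row hP.1 hP.2 hrowP.2 hr hs]
      refine ⟨by simp [hrowP.1], fun j hj => ?_⟩
      by_cases hjs : j = sN
      · subst hjs
        rw [pv_getD_concat _ _ _ _ (hrowP.1).symm]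
      · have hlt : j < row.length := by omega
        rw [List.getD_append _ _ _ _ hlt]
        exact hrowP.2 j (by omega)

def pvStB (grid : List (List Int)) (M N c : Nat)
    (st : Option Int × Option (List (List (Option Int)))) : Prop :=
  st.1 = pvBest grid M N c ∧ (c = 0 → st.2 = none) ∧
  ∀ c', c = c' + 1 → ∃ T, st.2 = some T ∧ pvTab grid M N c' T

lemma pv_stepB_spec (grid : List (List Int)) (M N : Nat) (hM : 0 < M) (hN : 0 < N)
    (c : Nat) (st : Option Int × Option (List (List (Option Int))))
    (h : pvStB grid M N c st) :
    pvStB grid M N (c + 1) (pvStepB grid (M : Int) (N : Int) st (c : Int)) := by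
  obtain ⟨h1, h20, h2S⟩ := h
  have hTab : pvTab grid M N c (pvLayerB grid (M : Int) (N : Int) (c : Int) st.2) :=
    pv_layerB_spec grid M N c st.2 h20 h2S
  have htail : PySem.List.pyGetD (PySem.List.pyGetD
      (pvLayerB grid (M : Int) (N : Int) (c : Int) st.2) ((M : Int) - 1) [])
      ((N : Int) - 1) none = pvg grid c (M - 1) (N - 1) := by
    rw [(by omega : (M : Int) - 1 = ((M - 1 : Nat) : Int)),
      (by omega : (N : Int) - 1 = ((N - 1 : Nat) : Int))]
    simp only [PySem.List.pyGetD_natCast]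
    exact (hTab.2 (M - 1) (by omega)).2 (N - 1) (by omega)
  simp only [pvStepB]
  refine ⟨?_, fun h => absurd h (by omega), fun c' hc' => ?_⟩
  · show (match PySem.List.pyGetD (PySem.List.pyGetD
        (pvLayerB grid (M : Int) (N : Int) (c : Int) st.2) ((M : Int) - 1) [])
        ((N : Int) - 1) none with
      | none => st.1
      | some t => match st.1 with
        | none => some t
        | some b => if t > b then some t else some b) = pvBest grid M N (c + 1)
    rw [htail, h1]
    conv_rhs => rw [pvBest]
    cases pvg grid c (M - 1) (N - 1) <;> cases pvBest grid M N c <;> rfl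
  · have hcc : c' = c := by omega
    subst hcc
    exact ⟨_, rfl, hTab⟩

lemma pv_B_eq (grid : List (List Int)) (k : Int) (hne : grid ≠ [])
    (hn0 : 0 < (grid.headD []).length) (hk : 0 ≤ k) :
    maxPathScore_alt grid k = pvRes grid k grid.length (grid.headD []).length := by
  have hhead : PySem.List.pyGetD grid 0 ([] : List Int) = grid.headD [] := by
    cases grid with
    | nil => cases hne rfl
    | cons g tl => simp [PySem.List.pyGetD_zero]
  have hM0 : 0 < grid.length := by
    cases grid with
    | nil => cases hne rfl
    | cons g tl => simp
  simp only [maxPathScore_alt, hhead]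
  set M := grid.length with hMdef
  set N := (grid.headD []).length with hNdef
  set LN := (min k ((M : Int) + (N : Int) - 1)).toNat with hLN
  have hb : min k ((M : Int) + (N : Int) - 1) + 1 = ((LN + 1 : Nat) : Int) := by omega
  rw [hb]
  have hfold := pv_fold_range_nat (pvStB grid M N) (pvStepB grid (M : Int) (N : Int)) (LN + 1)
    (fun c st hc hst => pv_stepB_spec grid M N hM0 hn0 c st hst)
    ((none : Option Int), (none : Option (List (List (Option Int)))))
    ⟨rfl, fun _ => rfl, fun c' h => absurd h (by omega)⟩
  obtain ⟨h1, -, -⟩ := hfold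
  rw [h1]
  unfold pvRes
  rw [← hLN]

-- ===== VERDICT (by name: the statement is the Claim_ definition above) =====
theorem maxPathScore_spec : Claim_equal_maxPathScore := by
  intro grid k _ hpre
  obtain ⟨hne, hn0, -, hk⟩ := hpre
  unfold Spec_maxPathScore
  rw [pv_A_eq grid k hne hn0 hk, pv_B_eq grid k hne hn0 hk]
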